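-- pv_equiv track=rewrite | github.com/assert-justice/advent_of_code | 2021/d14-2.py | freq_add
-- ===== SOURCE A (Python) =====
-- def freq_add(f1, f2):
--     fs = {}
--     for k,v in f1.items():
--         if not k in fs:
--             fs[k] = 0
--         fs[k]+=v
--     for k,v in f2.items():
--         if not k in fs:
--             fs[k] = 0
--         fs[k]+=v
--     return fs
-- ===== SOURCE B (Python) =====
-- def freq_add(f1, f2):
--     keys = list(dict.fromkeys(list(f1) + list(f2)))
--     return {k: f1.get(k, 0) + f2.get(k, 0) for k in keys}
-- ===== Notes on version B (the rewrite author's own statement) =====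
-- stated objective: idiomatic
-- what changed: Instead of two sequential accumulating passes that mutate a result dict entry by entry, B first computes the ordered combined key list with dict.fromkeys and then builds the result in one lookup-driven dict comprehension using .get(k, 0).
import Mathlib
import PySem

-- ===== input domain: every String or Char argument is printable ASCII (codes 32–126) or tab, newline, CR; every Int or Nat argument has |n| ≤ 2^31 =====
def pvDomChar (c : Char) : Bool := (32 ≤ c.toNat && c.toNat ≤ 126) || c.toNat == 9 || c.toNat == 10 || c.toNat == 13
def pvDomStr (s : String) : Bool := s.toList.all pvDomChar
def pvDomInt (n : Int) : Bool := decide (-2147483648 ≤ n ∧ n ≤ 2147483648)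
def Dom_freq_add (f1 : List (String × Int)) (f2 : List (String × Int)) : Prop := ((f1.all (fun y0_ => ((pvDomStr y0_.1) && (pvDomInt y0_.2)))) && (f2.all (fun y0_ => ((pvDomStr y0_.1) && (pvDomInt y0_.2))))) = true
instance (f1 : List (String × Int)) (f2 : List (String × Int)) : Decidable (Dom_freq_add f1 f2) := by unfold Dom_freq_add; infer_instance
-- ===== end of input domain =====

-- B replaces A's two accumulating passes over a mutable dict by an ordered key-dedup plus one lookup-driven comprehension (idiomatic; same cost).

-- ===== PORT A =====
-- one iteration of A's loop body: 'if not k in fs: fs[k] = 0; fs[k] += v'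
def freqAddStep (fs : PySem.Dict String Int) (kv : String × Int) : PySem.Dict String Int :=
  let fs' := if fs.contains kv.1 then fs else fs.insert kv.1 0
  fs'.modify kv.1 0 (· + kv.2)

def freq_add (f1 : List (String × Int)) (f2 : List (String × Int)) : List (String × Int) :=
  let fs := f1.foldl freqAddStep PySem.Dict.empty
  let fs := f2.foldl freqAddStep fs
  fs.items

-- ===== PORT B =====
def freq_add_alt (f1 : List (String × Int)) (f2 : List (String × Int)) : List (String × Int) :=
  let keys := PySem.List.dedup (f1.map Prod.fst ++ f2.map Prod.fst)
  keys.map (fun k => (k, (PySem.Dict.mk f1).getD k 0 + (PySem.Dict.mk f2).getD k 0))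

-- ===== PRECONDITION & SPEC =====
-- Pre_ excludes association lists with duplicate keys in f1 or in f2: those do not represent
-- any Python dict (dict construction collapses duplicates), so A never sees such an input.
def Pre_freq_add (f1 : List (String × Int)) (f2 : List (String × Int)) : Prop :=
  (f1.map Prod.fst).Nodup ∧ (f2.map Prod.fst).Nodup
instance (f1 : List (String × Int)) (f2 : List (String × Int)) : Decidable (Pre_freq_add f1 f2) := by unfold Pre_freq_add; infer_instance

def pvWitness_freq_add : (List (String × Int)) × (List (String × Int)) :=
  ([("a", 2), ("b", -1)], [("b", 5), ("c", 0)])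

def Spec_freq_add (f1 : List (String × Int)) (f2 : List (String × Int)) (out : List (String × Int)) : Prop := out = freq_add_alt f1 f2
instance (f1 : List (String × Int)) (f2 : List (String × Int)) (out : List (String × Int)) : Decidable (Spec_freq_add f1 f2 out) := by unfold Spec_freq_add; infer_instance

-- ===== CLAIM (what is proved, stated in full; the proofs are below) =====
def Claim_equal_freq_add : Prop := ∀ (f1 : List (String × Int)) (f2 : List (String × Int)), Dom_freq_add f1 f2 → Pre_freq_add f1 f2 → Spec_freq_add f1 f2 (freq_add f1 f2)

-- ===== LEMMAS AND PROOFS =====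

-- total weight list l assigns to key k
def sumv (l : List (String × Int)) (k : String) : Int :=
  ((l.filter (fun kv => kv.1 == k)).map Prod.snd).sum

theorem keys_freqAddStep (fs : PySem.Dict String Int) (kv : String × Int) :
    (freqAddStep fs kv).keys = PySem.Set.add fs.keys kv.1 := by
  unfold freqAddStep
  by_cases h : fs.contains kv.1 = true
  · rw [if_pos h, PySem.Dict.keys_modify,
      PySem.Dict.keys_insert_of_contains _ _ h,
      PySem.Set.add_of_mem ((PySem.Dict.contains_iff_mem_keys fs kv.1).mp h)]
  · have hf : fs.contains kv.1 = false := Bool.eq_false_iff.mpr h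
    rw [if_neg h, PySem.Dict.keys_modify,
      PySem.Dict.keys_insert_of_contains _ _ (PySem.Dict.contains_insert_self _ _ _),
      PySem.Dict.keys_insert_of_not_contains _ _ hf,
      PySem.Set.add_of_not_mem (fun hm => h ((PySem.Dict.contains_iff_mem_keys fs kv.1).mpr hm))]

theorem keys_foldl_freqAddStep (l : List (String × Int)) (fs : PySem.Dict String Int) :
    (l.foldl freqAddStep fs).keys = PySem.Set.update fs.keys (l.map Prod.fst) := by
  induction l generalizing fs with
  | nil => simp [PySem.Set.update]
  | cons kv t ih =>
      simp only [List.foldl_cons, List.map_cons, PySem.Set.update_cons, ih, keys_freqAddStep]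

theorem nodup_keys_foldl_freqAddStep (l : List (String × Int)) (fs : PySem.Dict String Int)
    (h : fs.keys.Nodup) : (l.foldl freqAddStep fs).keys.Nodup := by
  rw [keys_foldl_freqAddStep]; exact PySem.Set.nodup_update _ _ h

theorem getD_freqAddStep (fs : PySem.Dict String Int) (kv : String × Int) (k : String) :
    (freqAddStep fs kv).getD k 0 = fs.getD k 0 + (if kv.1 = k then kv.2 else 0) := by
  unfold freqAddStep
  by_cases h : fs.contains kv.1 = true
  · rw [if_pos h, PySem.Dict.getD_modify]
    by_cases hk : k = kv.1
    · rw [if_pos hk, if_pos hk.symm, hk]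
    · rw [if_neg hk, if_neg (fun h' => hk h'.symm), Int.add_zero]
  · have hf : fs.contains kv.1 = false := Bool.eq_false_iff.mpr h
    rw [if_neg h, PySem.Dict.getD_modify, PySem.Dict.getD_insert, PySem.Dict.getD_insert]
    by_cases hk : k = kv.1
    · rw [if_pos hk, if_pos rfl, if_pos hk.symm, hk,
        PySem.Dict.getD_of_not_contains _ _ hf]
    · rw [if_neg hk, if_neg hk, if_neg (fun h' => hk h'.symm), Int.add_zero]

theorem getD_foldl_freqAddStep (l : List (String × Int)) (fs : PySem.Dict String Int) (k : String) :
    (l.foldl freqAddStep fs).getD k 0 = fs.getD k 0 + sumv l k := by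
  induction l generalizing fs with
  | nil => simp [sumv]
  | cons kv t ih =>
      simp only [List.foldl_cons, ih, getD_freqAddStep, sumv, List.filter_cons]
      by_cases h : kv.1 = k <;> [ (simp [h]; omega) ; simp [h] ]

theorem sumv_of_not_mem (l : List (String × Int)) (k : String) (h : k ∉ l.map Prod.fst) :
    sumv l k = 0 := by
  unfold sumv
  have hnil : l.filter (fun kv => kv.1 == k) = [] := by
    rw [List.filter_eq_nil_iff]
    intro p hp hbeq
    have hk : p.1 = k := by simpa using hbeq
    exact h (hk ▸ List.mem_map_of_mem hp)
  rw [hnil]; rfl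

theorem getD_mk_eq_sumv (f : List (String × Int)) (hnd : (f.map Prod.fst).Nodup) (k : String) :
    (PySem.Dict.mk f).getD k 0 = sumv f k := by
  induction f with
  | nil =>
      have he : (PySem.Dict.mk ([] : List (String × Int))) = PySem.Dict.empty := rfl
      rw [he, PySem.Dict.getD_empty]; rfl
  | cons kv t ih =>
      simp only [List.map_cons, List.nodup_cons] at hnd
      rw [PySem.Dict.getD_eq_get?_getD, PySem.Dict.get?_mk_cons]
      by_cases h : kv.1 = k
      · rw [if_pos (by simpa using h), Option.getD_some]
        have h0 : sumv t k = 0 := sumv_of_not_mem t k (h ▸ hnd.1)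
        have h0' : ((t.filter (fun kv => kv.1 == k)).map Prod.snd).sum = 0 := h0
        simp [sumv, h, h0']
      · rw [if_neg (by simpa using h), ← PySem.Dict.getD_eq_get?_getD, ih hnd.2]
        simp [sumv, h]

theorem sumv_append (l1 l2 : List (String × Int)) (k : String) :
    sumv (l1 ++ l2) k = sumv l1 k + sumv l2 k := by
  simp [sumv]

-- ===== VERDICT (by name: the statement is the Claim_ definition above) =====
theorem freq_add_spec : Claim_equal_freq_add := by
  intro f1 f2 _hDom hPre
  unfold Spec_freq_add freq_add freq_add_alt
  simp only
  rw [← List.foldl_append]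
  have hnd : ((f1 ++ f2).foldl freqAddStep PySem.Dict.empty).keys.Nodup :=
    nodup_keys_foldl_freqAddStep _ _ (by simp [PySem.Dict.empty, PySem.Dict.keys])
  rw [PySem.Dict.items_eq_map_keys _ hnd 0]
  rw [keys_foldl_freqAddStep]
  have hkeys : PySem.Set.update (PySem.Dict.empty : PySem.Dict String Int).keys ((f1 ++ f2).map Prod.fst)
      = PySem.List.dedup (f1.map Prod.fst ++ f2.map Prod.fst) := by
    rw [PySem.List.dedup_eq_ofList, ← List.map_append, ← PySem.Set.update_nil_left]
    rfl
  rw [hkeys]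
  apply List.map_congr_left
  intro k _
  rw [getD_foldl_freqAddStep, sumv_append,
    getD_mk_eq_sumv f1 hPre.1 k, getD_mk_eq_sumv f2 hPre.2 k,
    PySem.Dict.getD_empty, Int.zero_add]
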